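-- pv_equiv track=rewrite | github.com/UAlbertaALTLab/morphodict | CreeDictionary/CreeDictionary/paradigm/filler.py | does_raw_row_has_row_header
-- ===== SOURCE A (Python) =====
-- def does_raw_row_has_row_header(raw_row: list[str]) -> bool:
--     """
--     does the row host inflection or not?
--     """
--
--     # we check if the row has a "left aligned heading"
--
--     for i, raw_cell in enumerate(raw_row):
--
--         if (
--             raw_cell.startswith('"')
--             and raw_cell.endswith('"')
--             or raw_cell.startswith(":")
--         ):
--             return i == 0
--
--     return False
-- ===== SOURCE B (Python) =====
-- def does_raw_row_has_row_header(raw_row: list[str]) -> bool: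
--     # Only the first cell matters: A returns i == 0 at the first matching
--     # cell, so any later match yields False, same as no match.
--     if not raw_row:
--         return False
--     cell = raw_row[0]
--     return (cell.startswith('"') and cell.endswith('"')) or cell.startswith(":")
-- ===== Notes on version B (the rewrite author's own statement) =====
-- stated objective: simpler
-- what changed: Replaces the enumerate loop over all cells with a closed-form test of only the first cell, since a match at any later index returns i==0 = False anyway.
import Mathlib
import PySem

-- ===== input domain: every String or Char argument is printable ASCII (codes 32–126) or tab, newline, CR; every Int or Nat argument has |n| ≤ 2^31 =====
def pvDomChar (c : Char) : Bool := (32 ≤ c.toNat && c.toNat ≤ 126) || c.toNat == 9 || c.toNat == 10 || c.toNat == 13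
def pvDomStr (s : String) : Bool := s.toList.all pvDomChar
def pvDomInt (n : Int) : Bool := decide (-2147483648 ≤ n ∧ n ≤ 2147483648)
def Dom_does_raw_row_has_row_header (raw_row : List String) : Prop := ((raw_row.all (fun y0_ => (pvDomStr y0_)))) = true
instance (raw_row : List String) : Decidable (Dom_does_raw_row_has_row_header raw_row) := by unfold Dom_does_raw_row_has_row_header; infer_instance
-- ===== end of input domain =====

-- ===== PORT A =====
-- loop: for i, raw_cell in enumerate(raw_row): if cond: return i == 0; return False
def pvALoop_does_raw_row_has_row_header : List String → Nat → Bool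
  | [], _ => false
  | raw_cell :: rest, i =>
    if (PySem.Str.startswith raw_cell "\"" && PySem.Str.endswith raw_cell "\"") || PySem.Str.startswith raw_cell ":" then
      decide (i = 0)
    else
      pvALoop_does_raw_row_has_row_header rest (i + 1)

def does_raw_row_has_row_header (raw_row : List String) : Bool :=
  pvALoop_does_raw_row_has_row_header raw_row 0

-- ===== PORT B =====
-- B: only the first cell decides the result
def does_raw_row_has_row_header_alt (raw_row : List String) : Bool :=
  match raw_row with
  | [] => false
  | cell :: _ =>
    (PySem.Str.startswith cell "\"" && PySem.Str.endswith cell "\"") || PySem.Str.startswith cell ":"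

-- ===== PRECONDITION & SPEC =====
def Spec_does_raw_row_has_row_header (raw_row : List String) (out : Bool) : Prop := out = does_raw_row_has_row_header_alt raw_row
instance (raw_row : List String) (out : Bool) : Decidable (Spec_does_raw_row_has_row_header raw_row out) := by unfold Spec_does_raw_row_has_row_header; infer_instance

-- ===== CLAIM (what is proved, stated in full; the proofs are below) =====
def Claim_equal_does_raw_row_has_row_header : Prop := ∀ (raw_row : List String), Dom_does_raw_row_has_row_header raw_row → Spec_does_raw_row_has_row_header raw_row (does_raw_row_has_row_header raw_row)

-- ===== LEMMAS AND PROOFS =====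

-- ===== VERDICT (by name: the statement is the Claim_ definition above) =====
-- with start index ≥ 1 the loop can only return False
theorem pvALoop_pos_false (xs : List String) (i : Nat) (h : i ≠ 0) :
    pvALoop_does_raw_row_has_row_header xs i = false := by
  induction xs generalizing i with
  | nil => rfl
  | cons x rest ih =>
    simp only [pvALoop_does_raw_row_has_row_header]
    split
    · simp [h]
    · exact ih (i + 1) (Nat.succ_ne_zero i)

theorem does_raw_row_has_row_header_spec : Claim_equal_does_raw_row_has_row_header := by
  intro raw_row _
  unfold Spec_does_raw_row_has_row_header
  cases raw_row with
  | nil => rfl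
  | cons cell rest =>
    simp only [does_raw_row_has_row_header, does_raw_row_has_row_header_alt,
      pvALoop_does_raw_row_has_row_header]
    by_cases h : ((PySem.Str.startswith cell "\"" && PySem.Str.endswith cell "\"") || PySem.Str.startswith cell ":") = true
    · rw [if_pos h]; exact h.symm
    · rw [if_neg h, pvALoop_pos_false rest 1 one_ne_zero]
      exact (Bool.not_eq_true _).mp h |>.symm
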